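-- pv_equiv track=rewrite | github.com/mcjamil/cribbage_hand_scorer | cribbage_hand_scorer.py | score_sequences
-- ===== SOURCE A (Python) =====
-- from itertools import product, combinations, chain
--
-- SINGLE_CARD_SCORE = 1
--
-- MIN_SEQUENCE_SIZE = 3
--
-- def score_sequence(cards):
--   """
--   Score a sequence (if present)
--
--   :param cards: tuple of card tuples (e.g., ((5, 'h'), (3, 'c')) )
--   :type cards: tuple(tuple(int, str), ...)
--   :returns: sequence score
--   :rtype: int
--   """
--   sequence_score = 0
--   # Check to see that at least MIN_SEQUENCE_SIZE cards are present;
--   # if not, return immediately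
--   if len(cards) < MIN_SEQUENCE_SIZE:
--     return sequence_score
--   # Use list comprehension to make a list of the first element
--   # for each card (that's the card number)
--   card_numbers = [card[0] for card in cards]
--   # Sort the list before checking the sequence is valid
--   card_numbers.sort()
--   # Use set comprehension to make a set of the integer difference
--   # between successive elements
--   # If it's a sequence, all the set differences will be 1, so the
--   # set will contain only one element with the value 1
--   card_number_differences = {card_numbers[i + 1] - card_numbers[i]
--                              for i in range(len(card_numbers) - 1)}
--   if len(card_number_differences) == 1 and \
--     next(iter(card_number_differences)) == 1:
--     sequence_score += len(cards) * SINGLE_CARD_SCORE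
--   return sequence_score
--
-- def score_sequences(cards):
--   """
--   This function generates scores of any sequences present in valid
--   subsets of the parameter provided. It then sums the max scores
--   (since each max score represents the score for the longest unique sequence)
--
--   :param cards: tuple of card tuples (e.g., ((5, 'h'), (3, 'c')) )
--   :type cards: tuple(tuple(int, str), ...)
--   :returns: sum of max sequence scores (if sequences exist)
--   :rtype: int
--   """
--   # Generate all the sublists of the cards that contain
--   # MIN_SEQUENCE_SIZE or more cards
--   card_sublists = []
--   for i in range(MIN_SEQUENCE_SIZE, len(cards) + 1):
--     card_sublists.append(list(combinations(cards, i)))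
--   # This generates a nested list so use some itertools magic
--   # to flatten the list to one dimension
--   card_sublists = list(chain.from_iterable(card_sublists))
--
--   # Score each sublist and score by score total
--   card_sublist_scores = [score_sequence(card_sublist)
--                          for card_sublist in card_sublists]
--
--   # Now count the highest scores (duplicates are expected
--   # for multiple runs with different suits)
--   max_sublist_score = max(card_sublist_scores)
--   count_max_scores = sum(1 for i in card_sublist_scores
--                          if i == max_sublist_score)
--
--   # Finally return the total of the max scores
--   sequences_score = max_sublist_score * count_max_scores
--
--   return sequences_score
-- ===== SOURCE B (Python) =====
-- def score_sequences(cards):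
--   """
--   Rank-frequency single pass: sort the distinct ranks, scan maximal
--   consecutive streaks keeping the best (longest) streak length and the
--   sum of card-multiplicity products of streaks of that length.
--   """
--   freq = {}
--   for num, _suit in cards:
--     freq[num] = freq.get(num, 0) + 1
--   best_len = 0
--   best_count = 0
--   cur_len = 0
--   cur_prod = 1
--   prev = None
--   for r in sorted(freq):
--     if prev is not None and r == prev + 1:
--       cur_len += 1
--       cur_prod *= freq[r]
--     else:
--       cur_len = 1
--       cur_prod = freq[r]
--     if cur_len > best_len:
--       best_len = cur_len
--       best_count = cur_prod
--     elif cur_len == best_len: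
--       best_count += cur_prod
--     prev = r
--   return best_len * best_count if best_len >= 3 else 0
-- ===== Notes on version B (the rewrite author's own statement) =====
-- stated objective: faster
-- what changed: Replaces the exponential enumeration of all card subsets (each scored by sort + difference-set) with a single pass: build a rank-frequency dict, sort the distinct ranks, scan maximal consecutive streaks once, and return longest-streak length times the sum of frequency products of the longest streaks.
-- crash fix: On inputs with fewer than 3 cards A's max() over the empty score list raises ValueError; B returns 0. — e.g. on score_sequences([]): A raises ValueError, B returns 0
import Mathlib
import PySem

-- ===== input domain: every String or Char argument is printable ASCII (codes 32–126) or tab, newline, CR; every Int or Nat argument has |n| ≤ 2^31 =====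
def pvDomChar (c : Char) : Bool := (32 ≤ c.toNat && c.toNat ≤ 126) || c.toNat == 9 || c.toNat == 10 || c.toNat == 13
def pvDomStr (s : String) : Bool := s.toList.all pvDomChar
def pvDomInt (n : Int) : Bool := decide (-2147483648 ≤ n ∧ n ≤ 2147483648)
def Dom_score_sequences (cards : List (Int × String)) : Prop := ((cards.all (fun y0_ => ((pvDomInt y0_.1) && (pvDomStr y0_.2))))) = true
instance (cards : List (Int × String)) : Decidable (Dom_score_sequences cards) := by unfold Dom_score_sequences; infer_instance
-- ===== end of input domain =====

-- B replaces A's exponential enumeration of all card subsets by one sorted scan of the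
-- distinct ranks' maximal consecutive streaks (measured asymptotically faster).

-- ===== PORT A =====
-- helper of A: score of one subset (its size if its sorted ranks are consecutive)
def score_sequence (cards : List (Int × String)) : Int :=
  let sequence_score : Int := 0
  if PySem.List.len cards < 3 then sequence_score
  else
    let card_numbers := cards.map (fun card => card.1)
    let card_numbers := PySem.List.sorted card_numbers (fun x => x) false
    -- indices i and i+1 are always in range (len ≥ 3), so pyGetD is exact here
    let card_number_differences : PySem.Set Int :=
      PySem.Set.ofList ((PySem.List.pyRange 0 (PySem.List.len card_numbers - 1) 1).map
        (fun i => PySem.List.pyGetD card_numbers (i + 1) 0 - PySem.List.pyGetD card_numbers i 0))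
    -- len(s) == 1 and next(iter(s)) == 1 : a singleton set iterates its unique element
    if PySem.Set.len card_number_differences == 1 && card_number_differences.headD 0 == 1 then
      sequence_score + PySem.List.len cards * 1
    else sequence_score

def score_sequences (cards : List (Int × String)) : Int :=
  let card_sublists : List (List (List (Int × String))) :=
    (PySem.List.pyRange 3 (PySem.List.len cards + 1) 1).foldl
      (fun acc i => acc ++ [PySem.List.combinations cards i.toNat]) []
  let card_sublists := card_sublists.flatten
  let card_sublist_scores := card_sublists.map (fun cs => score_sequence cs)
  -- Python max(...) raises ValueError on an empty list: Pre_ excludes len < 3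
  let max_sublist_score := (PySem.List.max? card_sublist_scores (fun x => x)).getD 0
  let count_max_scores :=
    (card_sublist_scores.map (fun i => if i == max_sublist_score then (1 : Int) else 0)).sum
  max_sublist_score * count_max_scores

-- ===== PORT B =====
def score_sequences_alt (cards : List (Int × String)) : Int :=
  let freq : PySem.Dict Int Int :=
    cards.foldl (fun d c => d.insert c.1 (d.getD c.1 0 + 1)) PySem.Dict.empty
  let st :=
    (PySem.List.sorted freq.keys (fun x => x) false).foldl
      (fun (st : Int × Int × Int × Int × Option Int) r =>
        match st with
        | (best_len, best_count, cur_len, cur_prod, prev) =>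
          let cur : Int × Int :=
            if (match prev with | some p => r == p + 1 | none => false) then
              (cur_len + 1, cur_prod * freq.getD r 0)
            else (1, freq.getD r 0)
          let best : Int × Int :=
            if cur.1 > best_len then (cur.1, cur.2)
            else if cur.1 == best_len then (best_len, best_count + cur.2)
            else (best_len, best_count)
          (best.1, best.2, cur.1, cur.2, some r))
      (0, 0, 0, 1, none)
  if st.1 ≥ 3 then st.1 * st.2.1 else 0

-- ===== PRECONDITION & SPEC =====
-- Python A raises ValueError (max of an empty list) when fewer than 3 cards are given
def Pre_score_sequences (cards : List (Int × String)) : Prop := 3 ≤ cards.length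
instance (cards : List (Int × String)) : Decidable (Pre_score_sequences cards) := by
  unfold Pre_score_sequences; infer_instance

def pvWitness_score_sequences : (List (Int × String)) := [(1, "h"), (3, "c"), (2, "s")]

-- On inputs with fewer than 3 cards A's max() over the empty score list raises ValueError; B returns 0.
def Raises_score_sequences (cards : List (Int × String)) : Prop := cards.length < 3
instance (cards : List (Int × String)) : Decidable (Raises_score_sequences cards) := by
  unfold Raises_score_sequences; infer_instance
def pvRaiseWitness_score_sequences : (List (Int × String)) := []
def pvRaiseWitnessOut_score_sequences : Int := 0

def Spec_score_sequences (cards : List (Int × String)) (out : Int) : Prop := out = score_sequences_alt cards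
instance (cards : List (Int × String)) (out : Int) : Decidable (Spec_score_sequences cards out) := by
  unfold Spec_score_sequences; infer_instance

-- ===== CLAIM (what is proved, stated in full; the proofs are below) =====
def Claim_equal_score_sequences : Prop := ∀ (cards : List (Int × String)), Dom_score_sequences cards → Pre_score_sequences cards → Spec_score_sequences cards (score_sequences cards)
def Claim_raises_score_sequences : Prop := (∀ (cards : List (Int × String)), Dom_score_sequences cards → Raises_score_sequences cards → ¬ Pre_score_sequences cards) ∧ (Dom_score_sequences (pvRaiseWitness_score_sequences) ∧ Raises_score_sequences (pvRaiseWitness_score_sequences) ∧ score_sequences_alt (pvRaiseWitness_score_sequences) = pvRaiseWitnessOut_score_sequences)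

-- ===== LEMMAS AND PROOFS =====

-- ---- shared abbreviations ----
def ranksOf (cards : List (Int × String)) : List Int := cards.map Prod.fst
def dlistOf (cards : List (Int × String)) : List Int :=
  PySem.List.sorted (PySem.Set.ofList (ranksOf cards)) (fun x => x) false
def freqOf (cards : List (Int × String)) (r : Int) : Int := ((ranksOf cards).count r : Int)

-- a window of k consecutive integers starting at a
def window (a : Int) (k : Nat) : List Int := PySem.List.pyRange a (a + k) 1

-- ---- streak decomposition of a list of (distinct, sorted) ranks ----
def splitRun (p : Int) : List Int → List Int × List Int
  | [] => ([], [])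
  | x :: xs =>
    if x = p + 1 then
      let r := splitRun x xs
      (x :: r.1, r.2)
    else ([], x :: xs)

theorem splitRun_append (p : Int) (xs : List Int) :
    (splitRun p xs).1 ++ (splitRun p xs).2 = xs := by
  induction xs generalizing p with
  | nil => simp [splitRun]
  | cons x xs ih => by_cases h : x = p + 1 <;> simp [splitRun, h, ih]

theorem splitRun_snd_length (p : Int) (xs : List Int) :
    (splitRun p xs).2.length ≤ xs.length := by
  conv_rhs => rw [← splitRun_append p xs]
  simp

def Breaks : Option Int → List Int → Prop
  | some p, x :: _ => x ≠ p + 1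
  | _, _ => True

def streaks : List Int → List (List Int)
  | [] => []
  | a :: xs => (a :: (splitRun a xs).1) :: streaks (splitRun a xs).2
  termination_by l => l.length
  decreasing_by
    have := splitRun_snd_length a xs
    simp; omega

theorem streaks_nil : streaks [] = [] := by rw [streaks]

theorem streaks_cons (a : Int) (xs : List Int) :
    streaks (a :: xs) = (a :: (splitRun a xs).1) :: streaks (splitRun a xs).2 := by
  rw [streaks]

-- longest streak length, and sum of f-products over streaks of length L
def MX (D : List Int) : Int := ((streaks D).map (fun s => (s.length : Int))).foldr max 0
def SX (f : Int → Int) (D : List Int) (L : Int) : Int :=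
  (((streaks D).filter (fun s => (s.length : Int) == L)).map (fun s => (s.map f).prod)).sum

-- the loop body of B, abstracted over the frequency lookup
def fstep (f : Int → Int) (st : Int × Int × Int × Int × Option Int) (r : Int) :
    Int × Int × Int × Int × Option Int :=
  match st with
  | (best_len, best_count, cur_len, cur_prod, prev) =>
    let cur : Int × Int :=
      if (match prev with | some p => r == p + 1 | none => false) then
        (cur_len + 1, cur_prod * f r)
      else (1, f r)
    let best : Int × Int :=
      if cur.1 > best_len then (cur.1, cur.2)
      else if cur.1 == best_len then (best_len, best_count + cur.2)
      else (best_len, best_count)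
    (best.1, best.2, cur.1, cur.2, some r)

theorem splitRun_chain (p : Int) (xs : List Int) :
    List.IsChain (fun x y => y = x + 1) (p :: (splitRun p xs).1) := by
  induction xs generalizing p with
  | nil => simp [splitRun]
  | cons x xs ih =>
    by_cases h : x = p + 1
    · subst h
      simpa [splitRun] using ih (p + 1)
    · simp [splitRun, h]

theorem splitRun_breaks (p : Int) (xs : List Int) :
    Breaks (some ((splitRun p xs).1.getLastD p)) (splitRun p xs).2 := by
  induction xs generalizing p with
  | nil => simp [splitRun, Breaks]
  | cons x xs ih =>
    by_cases h : x = p + 1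
    · have := ih x
      subst h
      simp only [splitRun, if_true, List.getLastD_cons]
      exact this
    · simp only [splitRun, h, if_false, List.getLastD_nil]
      exact h

-- single step of B on the first element of a new streak
theorem fstep_new (f : Int → Int) (M : Int) (sumf : Int → Int)
    (bl bc cl cp : Int) (p? : Option Int) (a : Int)
    (hbl : bl = max M cl) (hcl : 0 ≤ cl)
    (hbc : bc = sumf bl + (if cl = bl ∧ 0 < cl then cp else 0))
    (hs : ∀ l, M < l → sumf l = 0)
    (hbrk : Breaks p? (a :: []) ) :
    fstep f (bl, bc, cl, cp, p?) a =
      (max bl 1,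
       (sumf (max bl 1) + (if cl = max bl 1 ∧ 0 < cl then cp else 0)) +
         (if 1 = max bl 1 then f a else 0),
       1, f a, some a) := by
  have hMbl : M ≤ bl := by rw [hbl]; exact le_max_left _ _
  have hclbl : cl ≤ bl := by rw [hbl]; exact le_max_right _ _
  have key : ∀ (q : Option Int),
      ((match q with | some p => (a == p + 1 : Bool) | none => false) = false) →
      fstep f (bl, bc, cl, cp, q) a =
        (max bl 1,
         (sumf (max bl 1) + (if cl = max bl 1 ∧ 0 < cl then cp else 0)) +
           (if 1 = max bl 1 then f a else 0),
         1, f a, some a) := by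
    intro q hcond
    simp only [fstep, hcond, Bool.false_eq_true, if_false]
    by_cases h1 : (1 : Int) > bl
    · have hm : max bl 1 = 1 := by omega
      have hcl0 : cl = 0 := by omega
      have hsf : sumf 1 = 0 := hs 1 (by omega)
      simp [h1, hm, hcl0, hsf]
    · by_cases h2 : (1 : Int) = bl
      · have hm : max bl 1 = bl := by omega
        simp [← h2, hbc]
      · have hm : max bl 1 = bl := by omega
        have h2' : ¬ ((1:Int) == bl) = true := by simp [h2]
        simp [h1, h2', hm, hbc]
        exact fun h => absurd h h2
  cases p? with
  | none => exact key none rfl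
  | some p =>
    refine key (some p) ?_
    have : a ≠ p + 1 := hbrk
    simp [this]

-- folding B over the continuation of the current streak
theorem fstep_ext (f : Int → Int) :
    ∀ (ext : List Int) (p M : Int) (sumf : Int → Int) (bl bc cl cp : Int),
    List.IsChain (fun x y => y = x + 1) (p :: ext) →
    bl = max M cl → 0 < cl →
    bc = sumf bl + (if cl = bl then cp else 0) →
    (∀ l, M < l → sumf l = 0) →
    ext.foldl (fstep f) (bl, bc, cl, cp, some p) =
      (max M (cl + ext.length),
       sumf (max M (cl + ext.length)) +
         (if cl + ext.length = max M (cl + ext.length) then cp * (ext.map f).prod else 0),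
       cl + ext.length, cp * (ext.map f).prod, some (ext.getLastD p)) := by
  intro ext
  induction ext with
  | nil =>
    intro p M sumf bl bc cl cp _ hbl _ hbc _
    simp only [List.foldl_nil, List.length_nil, Nat.cast_zero, add_zero, List.map_nil,
      List.prod_nil, mul_one, List.getLastD_nil]
    rw [← hbl, ← hbc]
  | cons x ext ih =>
    intro p M sumf bl bc cl cp hch hbl hcl hbc hs
    rw [List.isChain_cons_cons] at hch
    obtain ⟨hx, hch⟩ := hch
    have hMbl : M ≤ bl := by rw [hbl]; exact le_max_left _ _
    have hclbl : cl ≤ bl := by rw [hbl]; exact le_max_right _ _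
    simp only [List.foldl_cons]
    have hcond : ((x == p + 1 : Bool)) = true := by simp [hx]
    have harith : cl + (x :: ext).length = (cl + 1) + ext.length := by
      simp; omega
    have hprod : cp * ((x :: ext).map f).prod = (cp * f x) * (ext.map f).prod := by
      simp [mul_assoc]
    have hlast : (x :: ext).getLastD p = ext.getLastD x := by
      cases ext with
      | nil => simp
      | cons y t => simp [List.getLastD]
    rw [harith, hprod, hlast]
    by_cases h1 : bl < cl + 1
    · have hst : fstep f (bl, bc, cl, cp, some p) x
          = (cl + 1, cp * f x, cl + 1, cp * f x, some x) := by
        simp only [fstep, hcond, if_true]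
        simp [h1]
      rw [hst]
      have hM : cl + 1 = max M (cl + 1) := by omega
      rw [ih x M sumf (cl+1) (cp * f x) (cl+1) (cp * f x) hch (by omega) (by omega)
        (by rw [hs (cl+1) (by omega)]; simp) hs]
    · by_cases h2 : cl + 1 = bl
      · have hst : fstep f (bl, bc, cl, cp, some p) x
            = (bl, bc + cp * f x, cl + 1, cp * f x, some x) := by
          simp only [fstep, hcond, if_true]
          simp [h2]
        rw [hst]
        rw [ih x M sumf bl (bc + cp * f x) (cl+1) (cp * f x) hch (by omega) (by omega)
          (by rw [hbc]; simp [h2, show ¬ cl = bl by omega]) hs]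
      · have hst : fstep f (bl, bc, cl, cp, some p) x
            = (bl, bc, cl + 1, cp * f x, some x) := by
          simp only [fstep, hcond, if_true]
          simp [h1, show ¬ (cl + 1 == bl) = true by simp [h2]]
        rw [hst]
        rw [ih x M sumf bl bc (cl+1) (cp * f x) hch (by omega) (by omega)
          (by rw [hbc]; simp [show ¬ cl = bl by omega, show ¬ cl + 1 = bl by omega]) hs]

-- the whole fold of B, by streak decomposition
theorem foldB (f : Int → Int) :
    ∀ (n : Nat) (D : List Int), D.length ≤ n →
    ∀ (M : Int) (sumf : Int → Int) (bl bc cl cp : Int) (p? : Option Int),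
    bl = max M cl → 0 ≤ cl →
    bc = sumf bl + (if cl = bl ∧ 0 < cl then cp else 0) →
    (∀ l, M < l → sumf l = 0) →
    Breaks p? D →
    (D.foldl (fstep f) (bl, bc, cl, cp, p?)).1 = max bl (MX D) ∧
    (D.foldl (fstep f) (bl, bc, cl, cp, p?)).2.1 =
      sumf (max bl (MX D)) + (if cl = max bl (MX D) ∧ 0 < cl then cp else 0) +
        SX f D (max bl (MX D)) := by
  intro n
  induction n with
  | zero =>
    intro D hD M sumf bl bc cl cp p? hbl hcl hbc hs hbrk
    have hD0 : D = [] := List.eq_nil_of_length_eq_zero (Nat.le_zero.mp hD)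
    subst hD0
    have hmax : max bl (MX []) = bl := by
      rw [MX, streaks_nil]; simp
      rw [hbl]; omega
    simp only [List.foldl_nil, hmax, SX, streaks_nil, List.filter_nil, List.map_nil,
      List.sum_nil, add_zero]
    exact ⟨trivial, hbc⟩
  | succ n ihn =>
    intro D hD M sumf bl bc cl cp p? hbl hcl hbc hs hbrk
    cases D with
    | nil =>
      have hmax : max bl (MX []) = bl := by
        rw [MX, streaks_nil]; simp
        rw [hbl]; omega
      simp only [List.foldl_nil, hmax, SX, streaks_nil, List.filter_nil, List.map_nil,
        List.sum_nil, add_zero]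
      exact ⟨trivial, hbc⟩
    | cons a xs =>
      have hlen : xs.length ≤ n := by simpa using hD
      have hlenB : (splitRun a xs).2.length ≤ n := le_trans (splitRun_snd_length a xs) hlen
      set E := (splitRun a xs).1 with hE
      set B := (splitRun a xs).2 with hB
      have hxs : E ++ B = xs := splitRun_append a xs
      have hchain : List.IsChain (fun x y => y = x + 1) (a :: E) := splitRun_chain a xs
      have hbrkB : Breaks (some (E.getLastD a)) B := splitRun_breaks a xs
      have hMbl : M ≤ bl := by rw [hbl]; exact le_max_left _ _
      have hclbl : cl ≤ bl := by rw [hbl]; exact le_max_right _ _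
      have hlen0 : ((a :: E).length : Int) = 1 + (E.length : Int) := by
        simp [List.length_cons]; omega
      have hMX : MX (a :: xs) = max ((1 : Int) + (E.length : Int)) (MX B) := by
        simp only [MX, streaks_cons, List.map_cons, List.foldr_cons, ← hE, ← hB]
        rw [hlen0]
      have hSX : ∀ L, SX f (a :: xs) L =
          (if (1 : Int) + (E.length : Int) = L then f a * (E.map f).prod else 0) + SX f B L := by
        intro L
        simp only [SX, streaks_cons, List.filter_cons, ← hE, ← hB]
        by_cases hc : (1 : Int) + (E.length : Int) = L
        · have hc2 : (E.length : Int) + 1 = L := by omega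
          simp [hc, hc2]
        · have hc2 : ¬ ((E.length : Int) + 1 = L) := by omega
          simp [hc, hc2]
      have hfold : (a :: xs).foldl (fstep f) (bl, bc, cl, cp, p?)
          = B.foldl (fstep f) (E.foldl (fstep f) (fstep f (bl, bc, cl, cp, p?) a)) := by
        conv_lhs => rw [← hxs]
        simp [List.foldl_cons, List.foldl_append]
      have hbrk1 : Breaks p? [a] := by
        cases p? with
        | none => trivial
        | some p => exact hbrk
      rw [hfold, fstep_new f M sumf bl bc cl cp p? a hbl hcl hbc hs hbrk1]
      set sumf1 : Int → Int := fun l => sumf l + (if cl = l ∧ 0 < cl then cp else 0) with hsumf1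
      have hs1 : ∀ l, bl < l → sumf1 l = 0 := by
        intro l hl
        have h1 : sumf l = 0 := hs l (by omega)
        have h2 : ¬ (cl = l ∧ 0 < cl) := by omega
        simp [hsumf1, h1, h2]
      rw [fstep_ext f E a bl sumf1 (max bl 1) _ 1 (f a) hchain (by omega) (by omega) rfl hs1]
      have hpos : (0 : Int) < 1 + (E.length : Int) := by omega
      have hite : ∀ (x : Int), (if (1 + (E.length : Int) = x ∧ 0 < 1 + (E.length : Int)) then
            f a * (E.map f).prod else 0) =
          (if 1 + (E.length : Int) = x then f a * (E.map f).prod else 0) := by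
        intro x
        by_cases hx : 1 + (E.length : Int) = x
        · rw [if_pos ⟨hx, hpos⟩, if_pos hx]
        · rw [if_neg (by tauto), if_neg hx]
      obtain ⟨h1, h2⟩ := ihn B hlenB bl sumf1 (max bl (1 + (E.length : Int)))
        (sumf1 (max bl (1 + (E.length : Int))) +
          (if 1 + (E.length : Int) = max bl (1 + (E.length : Int)) then f a * (E.map f).prod else 0))
        (1 + (E.length : Int)) (f a * (E.map f).prod) (some (E.getLastD a))
        rfl (by omega) (by rw [hite]) hs1 hbrkB
      constructor
      · rw [h1, hMX, ← max_assoc]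
      · rw [h2, hMX, ← max_assoc]
        rw [hite, hSX]
        simp only [hsumf1]
        ring

theorem foldr_max_nonneg (L : List Int) : 0 ≤ L.foldr max 0 := by
  induction L with
  | nil => simp
  | cons x t ih => simp only [List.foldr_cons]; exact le_trans ih (le_max_right _ _)

theorem MX_nonneg (D : List Int) : 0 ≤ MX D := foldr_max_nonneg _

-- B computes: longest streak length times sum of frequency products of longest streaks
theorem altChar (cards : List (Int × String)) :
    score_sequences_alt cards =
      (if 3 ≤ MX (dlistOf cards) then
        MX (dlistOf cards) * SX (freqOf cards) (dlistOf cards) (MX (dlistOf cards)) else 0) := by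
  unfold score_sequences_alt dlistOf
  simp only []
  have hdict : cards.foldl (fun d c => d.insert c.1 (d.getD c.1 0 + 1))
        (PySem.Dict.empty : PySem.Dict Int Int)
      = (ranksOf cards).foldl (fun d x => d.insert x (d.getD x 0 + 1)) PySem.Dict.empty := by
    rw [ranksOf, List.foldl_map]
  rw [hdict]
  have hkeys : ((ranksOf cards).foldl (fun d x => d.insert x (d.getD x 0 + 1))
      (PySem.Dict.empty : PySem.Dict Int Int)).keys = PySem.Set.ofList (ranksOf cards) := by
    rw [PySem.Dict.keys_foldl_insert]
    rfl
  rw [hkeys]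
  have hgetD : ∀ r, ((ranksOf cards).foldl (fun d x => d.insert x (d.getD x 0 + 1))
      (PySem.Dict.empty : PySem.Dict Int Int)).getD r 0 = freqOf cards r := by
    intro r
    rw [PySem.Dict.getD_foldl_insert_add_one, freqOf]
    simp [PySem.Dict.empty, PySem.Dict.getD, PySem.Dict.get?]
  have hstep : (fun (st : Int × Int × Int × Int × Option Int) r =>
      match st with
      | (best_len, best_count, cur_len, cur_prod, prev) =>
        let cur : Int × Int :=
          if (match prev with | some p => r == p + 1 | none => false) then
            (cur_len + 1, cur_prod * ((ranksOf cards).foldl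
              (fun d x => d.insert x (d.getD x 0 + 1)) PySem.Dict.empty).getD r 0)
          else (1, ((ranksOf cards).foldl
              (fun d x => d.insert x (d.getD x 0 + 1)) PySem.Dict.empty).getD r 0)
        let best : Int × Int :=
          if cur.1 > best_len then (cur.1, cur.2)
          else if cur.1 == best_len then (best_len, best_count + cur.2)
          else (best_len, best_count)
        (best.1, best.2, cur.1, cur.2, some r)) = fstep (freqOf cards) := by
    funext st r
    cases st with
    | mk a st2 =>
      simp only [fstep, hgetD]
  rw [hstep]
  set D := PySem.List.sorted (PySem.Set.ofList (ranksOf cards)) (fun x => x) false with hD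
  obtain ⟨h1, h2⟩ := foldB (freqOf cards) D.length D le_rfl 0 (fun _ => 0) 0 0 0 1 none
    rfl le_rfl (by simp) (fun _ _ => rfl) (by cases D <;> trivial)
  have hm : max 0 (MX D) = MX D := max_eq_right (MX_nonneg D)
  rw [hm] at h1 h2
  rw [h1, h2]
  simp


-- ---- window lemmas ----
theorem window_length (a : Int) (k : Nat) : (window a k).length = k := by
  simp [window, PySem.List.length_pyRange_one]

theorem mem_window {a x : Int} {k : Nat} : x ∈ window a k ↔ a ≤ x ∧ x < a + k :=
  PySem.List.mem_pyRange_one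

theorem window_nodup (a : Int) (k : Nat) : (window a k).Nodup := PySem.List.nodup_pyRange_one _ _

theorem window_pairwise (a : Int) (k : Nat) : (window a k).Pairwise (· < ·) :=
  PySem.List.pairwise_lt_pyRange_one _ _

theorem window_cons (a : Int) (k : Nat) : window a (k + 1) = a :: window (a + 1) k := by
  rw [window, PySem.List.pyRange_one_cons (by push_cast; omega)]
  rw [window, show a + ((k : Nat) + 1 : Nat) = (a + 1) + (k : Nat) by push_cast; ring]

theorem window_concat (a : Int) (k : Nat) : window a (k + 1) = window a k ++ [a + k] := by
  rw [window, show a + ((k : Nat) + 1 : Nat) = (a + k) + 1 by push_cast; ring,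
    PySem.List.pyRange_one_succ_right (by omega)]
  rw [window]

theorem window_headD (a : Int) (k : Nat) (d : Int) : (window a (k + 1)).headD d = a := by
  rw [window_cons]; rfl

theorem window_getLastD (a : Int) (k : Nat) (d : Int) : (window a (k + 1)).getLastD d = a + k := by
  rw [window_concat]
  simp

theorem window_getElem (a : Int) (k : Nat) (i : Nat) (h : i < (window a k).length) :
    (window a k)[i] = a + i := PySem.List.getElem_pyRange_one _ _ _ h

-- ---- streak structure ----
theorem chain_eq_window : ∀ (ext : List Int) (a : Int),
    List.IsChain (fun x y => y = x + 1) (a :: ext) → a :: ext = window a (ext.length + 1) := by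
  intro ext
  induction ext with
  | nil =>
    intro a _
    rw [window]
    norm_num [PySem.List.pyRange_one_singleton]
  | cons x t ih =>
    intro a h
    rw [List.isChain_cons_cons] at h
    obtain ⟨hx, hch⟩ := h
    subst hx
    rw [show ((a + 1) :: t).length + 1 = (t.length + 1) + 1 from by simp, window_cons]
    rw [← ih (a + 1) hch]

theorem streaks_flatten : ∀ (D : List Int), (streaks D).flatten = D := by
  intro D
  induction D using streaks.induct with
  | case1 => simp [streaks_nil]
  | case2 a xs ih =>
    rw [streaks_cons, List.flatten_cons, ih]
    rw [List.cons_append, splitRun_append]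

theorem streaks_mem_window : ∀ (D : List Int) (s : List Int), s ∈ streaks D →
    ∃ k : Nat, s = window (s.headD 0) (k + 1) ∧ s.length = k + 1 := by
  intro D
  induction D using streaks.induct with
  | case1 => intro s hs; rw [streaks_nil] at hs; cases hs
  | case2 a xs ih =>
    intro s hs
    rw [streaks_cons] at hs
    rcases List.mem_cons.mp hs with h | h
    · subst h
      refine ⟨(splitRun a xs).1.length, ?_, by simp⟩
      have := chain_eq_window (splitRun a xs).1 a (splitRun_chain a xs)
      simpa using this
    · exact ih s h

theorem streaks_gap : ∀ (D : List Int), D.Pairwise (· < ·) →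
    (streaks D).Pairwise (fun s t => ∀ x ∈ s, ∀ y ∈ t, x + 1 < y) := by
  intro D
  induction D using streaks.induct with
  | case1 => intro _; rw [streaks_nil]; exact List.Pairwise.nil
  | case2 a xs ih =>
    intro hPW
    rw [streaks_cons]
    have hxs : (splitRun a xs).1 ++ (splitRun a xs).2 = xs := splitRun_append a xs
    set E := (splitRun a xs).1 with hE
    set B := (splitRun a xs).2 with hB
    have hPWxs : xs.Pairwise (· < ·) := List.Pairwise.of_cons hPW
    have hPWapp : (E ++ B).Pairwise (· < ·) := by rw [hxs]; exact hPWxs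
    have hPWB : B.Pairwise (· < ·) := (List.pairwise_append.mp hPWapp).2.1
    refine List.Pairwise.cons ?_ (ih hPWB)
    intro t ht x hx y hy
    have hyB : y ∈ B := by
      rw [← streaks_flatten B]; exact List.mem_flatten.mpr ⟨t, ht, hy⟩
    have hwin : a :: E = window a (E.length + 1) := chain_eq_window E a (splitRun_chain a xs)
    have hxle : x ≤ a + (E.length : Int) := by
      have hx' := hx; rw [hwin] at hx'
      have := mem_window.mp hx'
      push_cast at this; omega
    have hLmem : (a + (E.length : Int)) ∈ a :: E := by
      rw [hwin]; exact mem_window.mpr ⟨by omega, by push_cast; omega⟩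
    have hgt : ∀ z ∈ B, a + (E.length : Int) < z := by
      intro z hz
      have hzxs : z ∈ xs := by rw [← hxs]; exact List.mem_append_right _ hz
      rcases List.mem_cons.mp hLmem with hL | hL
      · have ha : a < z := (List.pairwise_cons.mp hPW).1 z hzxs
        omega
      · exact (List.pairwise_append.mp hPWapp).2.2 _ hL z hz
    have hlastE : E.getLastD a = a + (E.length : Int) := by
      have h1 : (a :: E).getLastD 0 = E.getLastD a := by
        cases E with
        | nil => simp
        | cons y t => simp [List.getLastD]
      have h2 : (window a (E.length + 1)).getLastD 0 = a + (E.length : Int) :=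
        window_getLastD a E.length 0
      rw [← h1, hwin, h2]
    have hy2 : a + (E.length : Int) + 1 < y := by
      cases hBc : B with
      | nil => rw [hBc] at hyB; cases hyB
      | cons b tb =>
        have hbrk : b ≠ E.getLastD a + 1 := by
          have := splitRun_breaks a xs
          rw [← hE, ← hB, hBc] at this
          exact this
        rw [hlastE] at hbrk
        have hbgt : a + (E.length : Int) < b := hgt b (by rw [hBc]; exact List.mem_cons_self)
        rw [hBc] at hyB
        rcases List.mem_cons.mp hyB with hyb | hyt
        · subst hyb; omega
        · have hby : b < y := (List.pairwise_cons.mp (by rw [hBc] at hPWB; exact hPWB)).1 y hyt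
          omega
    omega

theorem mem_streak_succ : ∀ (ss : List (List Int)) (s : List Int) (w : Int),
    ss.Pairwise (fun s t => ∀ x ∈ s, ∀ y ∈ t, x + 1 < y) →
    s ∈ ss → w ∈ s → w + 1 ∈ ss.flatten → w + 1 ∈ s := by
  intro ss
  induction ss with
  | nil => intro s w _ hs; cases hs
  | cons h t ih =>
    intro s w hp hs hw hflat
    obtain ⟨hhead, htail⟩ := List.pairwise_cons.mp hp
    rw [List.flatten_cons] at hflat
    rcases List.mem_append.mp hflat with h1 | h2
    · rcases List.mem_cons.mp hs with rfl | hst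
      · exact h1
      · have := hhead s hst (w + 1) h1 w hw
        omega
    · rcases List.mem_cons.mp hs with rfl | hst
      · obtain ⟨t', ht', hw1⟩ := List.mem_flatten.mp h2
        have := hhead t' ht' w hw (w + 1) hw1
        omega
      · exact ih s w htail hst hw h2

theorem window_in_streak : ∀ (k : Nat) (ss : List (List Int)) (s : List Int) (v : Int),
    ss.Pairwise (fun s t => ∀ x ∈ s, ∀ y ∈ t, x + 1 < y) →
    s ∈ ss → v ∈ s → (∀ j ∈ window v k, j ∈ ss.flatten) → ∀ j ∈ window v k, j ∈ s := by
  intro k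
  induction k with
  | zero =>
    intro ss s v _ _ _ _ j hj
    have := mem_window.mp hj
    exfalso; push_cast at this; omega
  | succ m ih =>
    intro ss s v hp hsmem hv hflat j hj
    rw [window_concat] at hj
    have hflat' : ∀ j' ∈ window v m, j' ∈ ss.flatten := fun j' hj' =>
      hflat j' (by rw [window_concat]; exact List.mem_append_left _ hj')
    rcases List.mem_append.mp hj with hj1 | hj2
    · exact ih ss s v hp hsmem hv hflat' j hj1
    · have hj2' : j = v + (m : Int) := by simpa using hj2
      subst hj2'
      cases m with
      | zero => simpa using hv
      | succ m' =>
        have hprev : v + (m' : Int) ∈ s := by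
          refine ih ss s v hp hsmem hv hflat' (v + (m' : Int)) (mem_window.mpr ⟨by omega, by push_cast; omega⟩)
        have hnext : v + (m' : Int) + 1 ∈ ss.flatten := by
          have h1 : v + ((m' + 1 : Nat) : Int) ∈ window v (m' + 1 + 1) := by
            rw [window_concat]
            exact List.mem_append_right _ (by simp)
          have h2 := hflat _ h1
          rwa [show v + ((m' + 1 : Nat) : Int) = v + (m' : Int) + 1 by push_cast; ring] at h2
        have hin := mem_streak_succ ss s (v + (m' : Int)) hp hsmem hprev hnext
        have hcast : v + ((m' + 1 : Nat) : Int) = v + (m' : Int) + 1 := by push_cast; ring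
        rw [hcast]
        exact hin

theorem le_foldr_max (x : Int) (L : List Int) (hx : x ∈ L) : x ≤ L.foldr max 0 := by
  induction L with
  | nil => cases hx
  | cons y t ih =>
    rcases List.mem_cons.mp hx with h | h
    · subst h; simp only [List.foldr_cons]; exact le_max_left _ _
    · exact le_trans (ih h) (by simp only [List.foldr_cons]; exact le_max_right _ _)

theorem len_le_MX (D : List Int) (s : List Int) (hs : s ∈ streaks D) : (s.length : Int) ≤ MX D :=
  le_foldr_max _ _ (List.mem_map_of_mem hs)

theorem foldr_max_mem (L : List Int) (h : 0 < L.foldr max 0) : L.foldr max 0 ∈ L := by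
  induction L with
  | nil => simp at h
  | cons x t ih =>
    simp only [List.foldr_cons] at h ⊢
    rcases max_cases x (t.foldr max 0) with ⟨h1, h2⟩ | ⟨h1, h2⟩
    · rw [h1]; exact List.mem_cons_self
    · rw [h1] at h ⊢
      exact List.mem_cons_of_mem _ (ih h)

theorem MX_attained (D : List Int) (h : 0 < MX D) :
    ∃ s ∈ streaks D, (s.length : Int) = MX D := by
  have h' : 0 < ((streaks D).map (fun s => (s.length : Int))).foldr max 0 := h
  have hmem := foldr_max_mem _ h'
  obtain ⟨s, hs, hlen⟩ := List.mem_map.mp hmem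
  exact ⟨s, hs, hlen⟩

theorem runlen_le_MX (D : List Int) (v : Int) (k : Nat) (hD : D.Pairwise (· < ·)) (hk : 0 < k)
    (h : ∀ j ∈ window v k, j ∈ D) : (k : Int) ≤ MX D := by
  have hv : v ∈ D := h v (mem_window.mpr ⟨le_refl _, by omega⟩)
  rw [← streaks_flatten D] at hv
  obtain ⟨s, hs, hvs⟩ := List.mem_flatten.mp hv
  have hgap := streaks_gap D hD
  have hsub := window_in_streak k (streaks D) s v hgap hs hvs
    (fun j hj => by rw [streaks_flatten]; exact h j hj)
  obtain ⟨m, hwin, hlen⟩ := streaks_mem_window D s hs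
  have hlast : v + ((k - 1 : Nat) : Int) ∈ s :=
    hsub _ (mem_window.mpr ⟨by omega, by omega⟩)
  have h1 : s.headD 0 ≤ v ∧ v < s.headD 0 + ((m + 1 : Nat) : Int) := by
    have hv' := hvs; rw [hwin] at hv'; exact mem_window.mp hv'
  have h2 : s.headD 0 ≤ v + ((k - 1 : Nat) : Int) ∧
      v + ((k - 1 : Nat) : Int) < s.headD 0 + ((m + 1 : Nat) : Int) := by
    have hl' := hlast; rw [hwin] at hl'; exact mem_window.mp hl'
  have hk_le : (k : Int) ≤ (s.length : Int) := by
    rw [hlen]; push_cast at h1 h2 ⊢; omega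
  exact le_trans hk_le (len_le_MX D s hs)

-- ---- the list of valid run starts ----
def startsP (Dl : List Int) (k : Nat) (v : Int) : Bool :=
  (window v k).all (fun j => decide (j ∈ Dl))

theorem filter_flatten' (L : List (List Int)) (p : Int → Bool) :
    L.flatten.filter p = (L.map (List.filter p)).flatten := by
  induction L with
  | nil => rfl
  | cons s t ih => simp [List.filter_append, ih]

theorem filter_eq_singleton {q : Int → Bool} : ∀ {s : List Int} {a : Int},
    s.Nodup → a ∈ s → (∀ v ∈ s, q v = true ↔ v = a) → s.filter q = [a] := by
  intro s
  induction s with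
  | nil => intro a _ ha _; cases ha
  | cons x t ih =>
    intro a hnd ha hq
    by_cases hx : x = a
    · subst hx
      have hqx : q x = true := (hq x List.mem_cons_self).mpr rfl
      rw [List.filter_cons_of_pos hqx]
      have ht : t.filter q = [] := List.filter_eq_nil_iff.mpr (fun v hv hqv => by
        have hne : v ≠ x := fun he => (List.nodup_cons.mp hnd).1 (he ▸ hv)
        exact hne ((hq v (List.mem_cons_of_mem _ hv)).mp hqv))
      rw [ht]
    · have hqx : ¬ q x = true := fun hqx => hx ((hq x List.mem_cons_self).mp hqx)
      rw [List.filter_cons_of_neg hqx]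
      refine ih (List.nodup_cons.mp hnd).2 ?_ (fun v hv => hq v (List.mem_cons_of_mem _ hv))
      rcases List.mem_cons.mp ha with h | h
      · exact absurd h.symm hx
      · exact h

theorem flatten_map_single (ss : List (List Int)) (q : Int → Bool) (p : List Int → Bool)
    (h : ∀ s ∈ ss, s.filter q = if p s then [s.headD 0] else []) :
    (ss.map (List.filter q)).flatten = (ss.filter p).map (fun s => s.headD 0) := by
  induction ss with
  | nil => rfl
  | cons s t ih =>
    simp only [List.map_cons, List.flatten_cons, h s List.mem_cons_self, List.filter_cons]
    rw [ih (fun s hs => h s (List.mem_cons_of_mem _ hs))]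
    by_cases hp : p s = true
    · simp [hp]
    · simp [hp]

theorem V_char (D : List Int) (k : Nat) (hD : D.Pairwise (· < ·)) (hk : (k : Int) = MX D)
    (h0 : 0 < k) :
    D.filter (startsP D k) =
      ((streaks D).filter (fun s => s.length == k)).map (fun s => s.headD 0) := by
  have hflat := streaks_flatten D
  have hgap := streaks_gap D hD
  have hper : ∀ s ∈ streaks D, s.filter (startsP D k) =
      if s.length == k then [s.headD 0] else [] := by
    intro s hs
    obtain ⟨m, hwin, hlen⟩ := streaks_mem_window D s hs
    set a := s.headD 0 with hA
    have key : ∀ v ∈ s, startsP D k v = true ↔ (s.length = k ∧ v = a) := by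
      intro v hv
      constructor
      · intro hsp
        have hall : ∀ j ∈ window v k, j ∈ D := by
          intro j hj
          have := (List.all_eq_true.mp hsp) j hj
          simpa using this
        have hsub := window_in_streak k (streaks D) s v hgap hs hv
          (fun j hj => by rw [hflat]; exact hall j hj)
        have hv' := hv
        rw [hwin] at hv'
        have hb1 := mem_window.mp hv'
        have hlast : v + ((k - 1 : Nat) : Int) ∈ s :=
          hsub _ (mem_window.mpr ⟨by omega, by omega⟩)
        rw [hwin] at hlast
        have hb2 := mem_window.mp hlast
        have hlek : (s.length : Int) ≤ (k : Int) := by rw [hk]; exact len_le_MX D s hs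
        have hmk : s.length = k := by
          push_cast at hb1 hb2 hlek
          omega
        refine ⟨hmk, ?_⟩
        push_cast at hb1 hb2
        have : m + 1 = k := by omega
        omega
      · rintro ⟨hsl, rfl⟩
        have hk' : m + 1 = k := by omega
        simp only [startsP, List.all_eq_true]
        intro j hj
        have hjs : j ∈ s := by
          rw [hwin, hk']
          exact hj
        simp only [decide_eq_true_eq]
        rw [← hflat]
        exact List.mem_flatten.mpr ⟨s, hs, hjs⟩
    by_cases hsl : s.length = k
    · rw [if_pos (by simp [hsl])]
      refine filter_eq_singleton ?_ ?_ ?_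
      · rw [hwin]; exact window_nodup _ _
      · rw [hwin]
        exact mem_window.mpr ⟨le_refl _, by push_cast; omega⟩
      · intro v hv
        rw [key v hv]
        simp [hsl]
    · rw [if_neg (by simp [hsl])]
      exact List.filter_eq_nil_iff.mpr (fun v hv hq => hsl ((key v hv).mp hq).1)
  conv_lhs => rw [show D.filter (startsP D k) = ((streaks D).flatten).filter (startsP D k)
    from by rw [hflat]]
  rw [filter_flatten']
  exact flatten_map_single (streaks D) (startsP D k) (fun s => s.length == k) hper

-- ---- counting subsets with a given rank multiset ----
def pick : List (Int × String) → List Int → List (Int × String)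
  | [], _ => []
  | c :: l, W => if c.1 ∈ W then c :: pick l (W.erase c.1) else pick l W

theorem pick_sublist : ∀ (l : List (Int × String)) (W : List Int), (pick l W).Sublist l := by
  intro l
  induction l with
  | nil => intro W; simp [pick]
  | cons c t ih =>
    intro W
    by_cases h : c.1 ∈ W
    · simp only [pick, if_pos h]
      exact (ih (W.erase c.1)).cons₂ c
    · simp only [pick, if_neg h]
      exact (ih W).cons c

theorem pick_perm : ∀ (l : List (Int × String)) (W : List Int), W.Nodup →
    (∀ w ∈ W, w ∈ l.map Prod.fst) → ((pick l W).map Prod.fst).Perm W := by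
  intro l
  induction l with
  | nil =>
    intro W _ hall
    have hW : W = [] := by
      cases W with
      | nil => rfl
      | cons w t => exact absurd (hall w List.mem_cons_self) (by simp)
    subst hW
    simp [pick]
  | cons c t ih =>
    intro W hnd hall
    by_cases hc : c.1 ∈ W
    · simp only [pick, if_pos hc, List.map_cons]
      rw [List.cons_perm_iff_perm_erase]
      refine ⟨hc, ih _ (hnd.erase _) ?_⟩
      intro w hw
      have hw1 : w ∈ W := List.mem_of_mem_erase hw
      have hw2 : w ≠ c.1 := ((List.Nodup.mem_erase_iff hnd).mp hw).1
      have h' := hall w hw1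
      rw [List.map_cons] at h'
      rcases List.mem_cons.mp h' with h | h
      · exact absurd h hw2
      · exact h
    · simp only [pick, if_neg hc]
      refine ih W hnd ?_
      intro w hw
      have h' := hall w hw
      rw [List.map_cons] at h'
      rcases List.mem_cons.mp h' with h | h
      · exact absurd (h ▸ hw) hc
      · exact h

theorem prod_count_cons_mem (W : List Int) (x : Int) (R : List Int)
    (hnd : W.Nodup) (hx : x ∈ W) :
    (W.map (fun w => (x :: R).count w)).prod =
      (W.map (fun w => R.count w)).prod + ((W.erase x).map (fun w => R.count w)).prod := by
  have hperm : W.Perm (x :: W.erase x) := List.perm_cons_erase hx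
  have h1 : (W.map (fun w => (x :: R).count w)).prod =
      ((x :: W.erase x).map (fun w => (x :: R).count w)).prod :=
    (hperm.map _).prod_eq
  have h2 : (W.map (fun w => R.count w)).prod =
      ((x :: W.erase x).map (fun w => R.count w)).prod :=
    (hperm.map _).prod_eq
  have herase : ∀ w ∈ W.erase x, (x :: R).count w = R.count w := by
    intro w hw
    have hne : w ≠ x := ((List.Nodup.mem_erase_iff hnd).mp hw).1
    rw [List.count_cons]
    simp [Ne.symm hne]
  have hmapE : (W.erase x).map (fun w => (x :: R).count w) = (W.erase x).map (fun w => R.count w) :=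
    List.map_congr_left herase
  rw [h1, h2]
  simp only [List.map_cons, List.prod_cons, hmapE]
  rw [List.count_cons]
  simp
  ring

theorem countPerm : ∀ (l : List (Int × String)) (W : List Int), W.Nodup →
    (PySem.List.combinations l W.length).countP (fun S => decide ((S.map Prod.fst).Perm W))
      = (W.map (fun w => (l.map Prod.fst).count w)).prod := by
  intro l
  induction l with
  | nil =>
    intro W _
    cases W with
    | nil => simp [PySem.List.combinations_zero]
    | cons w W' =>
      rw [show (w :: W').length = W'.length + 1 from rfl, PySem.List.combinations_nil_succ]
      simp
  | cons c t ih =>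
    intro W hnd
    cases W with
    | nil => simp [PySem.List.combinations_zero]
    | cons w W' =>
      rw [show (w :: W').length = W'.length + 1 from rfl, PySem.List.combinations_cons_succ]
      rw [List.countP_append, List.countP_map]
      by_cases hc : c.1 ∈ w :: W'
      · have hlenE : ((w :: W').erase c.1).length = W'.length := by
          rw [List.length_erase]
          simp [hc]
        have h1 : ((PySem.List.combinations t W'.length).countP
            ((fun S => decide ((S.map Prod.fst).Perm (w :: W'))) ∘ (fun c' => c :: c'))) =
            (PySem.List.combinations t ((w :: W').erase c.1).length).countP
              (fun S => decide ((S.map Prod.fst).Perm ((w :: W').erase c.1))) := by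
          rw [hlenE]
          refine List.countP_congr ?_
          intro S _
          simp only [Function.comp_apply, List.map_cons, decide_eq_true_eq]
          rw [List.cons_perm_iff_perm_erase]
          simp [hc]
        have hih2 := ih (w :: W') hnd
        rw [show (w :: W').length = W'.length + 1 from rfl] at hih2
        rw [h1, ih _ (hnd.erase c.1), hih2]
        rw [show List.map Prod.fst (c :: t) = c.1 :: List.map Prod.fst t from rfl]
        rw [prod_count_cons_mem (w :: W') c.1 (t.map Prod.fst) hnd hc]
        omega
      · have h1 : ((PySem.List.combinations t W'.length).countP
            ((fun S => decide ((S.map Prod.fst).Perm (w :: W'))) ∘ (fun c' => c :: c'))) = 0 := by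
          refine List.countP_eq_zero.mpr ?_
          intro S _
          simp only [Function.comp_apply, List.map_cons, decide_eq_true_eq]
          intro hperm
          exact hc (hperm.subset List.mem_cons_self)
        have hih2 := ih (w :: W') hnd
        rw [show (w :: W').length = W'.length + 1 from rfl] at hih2
        rw [h1, hih2, zero_add]
        rw [show List.map Prod.fst (c :: t) = c.1 :: List.map Prod.fst t from rfl]
        congr 1
        refine List.map_congr_left ?_
        intro y hy
        rw [List.count_cons]
        have : c.1 ≠ y := fun he => hc (he ▸ hy)
        simp [this]

theorem countP_or_disjoint {α : Type} (l : List α) (p q r : α → Bool)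
    (hpq : ∀ x ∈ l, p x = (q x || r x)) (hdis : ∀ x ∈ l, ¬(q x = true ∧ r x = true)) :
    l.countP p = l.countP q + l.countP r := by
  revert hpq hdis
  induction l with
  | nil => intro _ _; simp
  | cons x t ih =>
    intro hpq hdis
    have hpq' : ∀ y ∈ t, p y = (q y || r y) := fun y hy => hpq y (List.mem_cons_of_mem _ hy)
    have hdis' : ∀ y ∈ t, ¬(q y = true ∧ r y = true) := fun y hy => hdis y (List.mem_cons_of_mem _ hy)
    have hx := hpq x List.mem_cons_self
    simp only [List.countP_cons, ih hpq' hdis']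
    by_cases hq : q x = true
    · by_cases hr : r x = true
      · exact absurd ⟨hq, hr⟩ (hdis x List.mem_cons_self)
      · have hpx : p x = true := by rw [hx, hq]; rfl
        simp [hpx, hq, hr]
        omega
    · by_cases hr : r x = true
      · have hpx : p x = true := by rw [hx, hr]; simp
        simp [hpx, hq, hr]
        omega
      · have hpx : p x = false := by
          rw [hx]
          simp [hq, hr]
        simp [hpx, hq, hr]

theorem countP_partition {α : Type} : ∀ (V : List Int) (l : List α) (P : α → Bool)
    (Q : Int → α → Bool), V.Nodup →
    (∀ S ∈ l, (P S = true ↔ ∃ v ∈ V, Q v S = true)) →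
    (∀ S v w, v ∈ V → w ∈ V → Q v S = true → Q w S = true → v = w) →
    l.countP P = (V.map (fun v => l.countP (Q v))).sum := by
  intro V
  induction V with
  | nil =>
    intro l P Q _ hiff _
    have h0 : l.countP P = 0 := List.countP_eq_zero.mpr (fun S hS hP => by
      obtain ⟨v, hv, _⟩ := (hiff S hS).mp hP
      cases hv)
    simp [h0]
  | cons v0 V' ih =>
    intro l P Q hnd hiff huniq
    obtain ⟨hv0, hnd'⟩ := List.nodup_cons.mp hnd
    have hsplit : l.countP P = l.countP (Q v0) +
        l.countP (fun S => decide (∃ v ∈ V', Q v S = true)) := by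
      refine countP_or_disjoint l P (Q v0) _ ?_ ?_
      · intro S hS
        by_cases h1 : P S = true
        · obtain ⟨v, hv, hQ⟩ := (hiff S hS).mp h1
          rcases List.mem_cons.mp hv with rfl | hv'
          · rw [h1, hQ]; rfl
          · rw [h1]
            symm
            simp only [Bool.or_eq_true, decide_eq_true_eq]
            exact Or.inr ⟨v, hv', hQ⟩
        · have h2 : ¬ (Q v0 S = true) := fun hQ =>
            h1 ((hiff S hS).mpr ⟨v0, List.mem_cons_self, hQ⟩)
          have h3 : ¬ (∃ v ∈ V', Q v S = true) := by
            rintro ⟨v, hv, hQ⟩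
            exact h1 ((hiff S hS).mpr ⟨v, List.mem_cons_of_mem _ hv, hQ⟩)
          rw [Bool.eq_false_iff.mpr h1]
          symm
          simp only [Bool.or_eq_false_iff]
          exact ⟨Bool.eq_false_iff.mpr h2, by simpa using h3⟩
      · rintro S _ ⟨hQ0, hP'S⟩
        obtain ⟨v, hv', hQv⟩ := by simpa using hP'S
        have : v = v0 := huniq S v v0 (List.mem_cons_of_mem _ hv') List.mem_cons_self hQv hQ0
        exact hv0 (this ▸ hv')
    have hih := ih l (fun S => decide (∃ v ∈ V', Q v S = true)) Q hnd' (fun S _ => by simp)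
      (fun S v w hv hw => huniq S v w (List.mem_cons_of_mem _ hv) (List.mem_cons_of_mem _ hw))
    rw [hsplit, hih, List.map_cons, List.sum_cons]

theorem sum_single {β : Type} [DecidableEq β] (L : List β) (g : β → Nat) (a : β)
    (hnd : L.Nodup) (ha : a ∈ L) (h0 : ∀ b ∈ L, b ≠ a → g b = 0) :
    (L.map g).sum = g a := by
  revert hnd ha h0
  induction L with
  | nil => intro _ ha _; cases ha
  | cons x t ih =>
    intro hnd ha h0
    rcases List.mem_cons.mp ha with rfl | hat
    · simp only [List.map_cons, List.sum_cons]
      have hz : ∀ b ∈ t.map g, b = 0 := by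
        intro b hb
        obtain ⟨y, hy, hby⟩ := List.mem_map.mp hb
        rw [← hby]
        exact h0 y (List.mem_cons_of_mem _ hy)
          (fun he => (List.nodup_cons.mp hnd).1 (he ▸ hy))
      rw [List.sum_eq_zero hz]
      omega
    · have hxa : x ≠ a := fun he => (List.nodup_cons.mp hnd).1 (he ▸ hat)
      simp only [List.map_cons, List.sum_cons]
      rw [h0 x List.mem_cons_self hxa,
        ih (List.nodup_cons.mp hnd).2 hat (fun b hb => h0 b (List.mem_cons_of_mem _ hb))]
      omega

-- ---- characterization of A's subset score ----
theorem len1_head (L : List Int) : (L.length = 1 ∧ L.headD 0 = 1) ↔ L = [1] := by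
  cases L with
  | nil => simp
  | cons x t =>
    cases t with
    | nil => simp
    | cons y u => simp

theorem ofList_eq_singleton (xs : List Int) (y : Int) :
    PySem.Set.ofList xs = [y] ↔ xs ≠ [] ∧ ∀ x ∈ xs, x = y := by
  constructor
  · intro h
    constructor
    · intro hxs
      subst hxs
      simp at h
    · intro x hx
      have hx' : x ∈ PySem.Set.ofList xs := (PySem.Set.mem_ofList xs x).mpr hx
      rw [h] at hx'
      simpa using hx'
  · rintro ⟨hne, hall⟩
    have hy : y ∈ PySem.Set.ofList xs := by
      rw [PySem.Set.mem_ofList]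
      cases hxs : xs with
      | nil => exact absurd hxs hne
      | cons x t =>
        have := hall x (by rw [hxs]; exact List.mem_cons_self)
        rw [← this]
        exact List.mem_cons_self
    have hnd := PySem.Set.nodup_ofList xs
    have hmem : ∀ z ∈ PySem.Set.ofList xs, z = y := fun z hz =>
      hall z ((PySem.Set.mem_ofList xs z).mp hz)
    cases hS : PySem.Set.ofList xs with
    | nil => rw [hS] at hy; cases hy
    | cons z t =>
      rw [hS] at hmem hnd
      have hz : z = y := hmem z List.mem_cons_self
      cases t with
      | nil => rw [hz]
      | cons z2 t2 =>
        have hz2 : z2 = y := hmem z2 (List.mem_cons_of_mem _ List.mem_cons_self)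
        exfalso
        exact (List.nodup_cons.mp hnd).1 (by rw [hz, ← hz2]; exact List.mem_cons_self)

theorem consec_char (l : List Int) (hne : l ≠ []) :
    (∀ k, k + 1 < l.length → l.getD (k + 1) 0 = l.getD k 0 + 1) ↔
      l = window (l.headD 0) l.length := by
  constructor
  · intro h
    have hstep : ∀ k, k < l.length → l.getD k 0 = l.headD 0 + k := by
      intro k
      induction k with
      | zero =>
        intro _
        cases l with
        | nil => exact absurd rfl hne
        | cons x t => simp
      | succ m ihm =>
        intro hm
        have h1 := ihm (by omega)
        have h2 := h m (by omega)
        rw [h2, h1]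
        push_cast
        ring
    refine List.ext_getElem (by rw [window_length]) ?_
    intro i h1 h2
    have hg := hstep i h1
    rw [List.getD_eq_getElem l 0 h1] at hg
    rw [hg, window_getElem]
  · intro h k hk
    have hg : ∀ i, i < l.length → l.getD i 0 = l.headD 0 + i := by
      intro i hi
      rw [List.getD_eq_getElem?_getD]
      conv_lhs => rw [h]
      simp only [window, PySem.List.getElem?_pyRange_one]
      rw [show (l.headD 0 + (l.length : Int) - l.headD 0).toNat = l.length from by omega,
        if_pos hi]
      rfl
    rw [hg (k + 1) (by omega), hg k (by omega)]
    push_cast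
    ring

theorem score_char (S : List (Int × String)) :
    score_sequence S =
      if 3 ≤ S.length ∧
          PySem.List.sorted (S.map Prod.fst) (fun x => x) false
            = window ((PySem.List.sorted (S.map Prod.fst) (fun x => x) false).headD 0) S.length
      then (S.length : Int) else 0 := by
  unfold score_sequence
  simp only []
  rw [show (fun (card : Int × String) => card.1) = (Prod.fst : Int × String → Int) from rfl]
  set l := PySem.List.sorted (S.map Prod.fst) (fun x => x) false with hl
  have hlen : l.length = S.length := by rw [hl, PySem.List.length_sorted, List.length_map]
  by_cases h3 : PySem.List.len S < 3
  · rw [if_pos h3]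
    have hno : ¬(3 ≤ S.length ∧ l = window (l.headD 0) S.length) := by
      rw [PySem.List.len_eq] at h3
      intro hc
      exact absurd hc.1 (by omega)
    rw [if_neg hno]
  · rw [if_neg h3]
    rw [PySem.List.len_eq] at h3
    have h3' : 3 ≤ S.length := by omega
    have hne : l ≠ [] := by
      intro h
      rw [h] at hlen
      simp at hlen
      omega
    have hlenl : PySem.List.len l = (S.length : Int) := by rw [PySem.List.len_eq, hlen]
    rw [hlenl]
    set dl := (PySem.List.pyRange 0 ((S.length : Int) - 1) 1).map
      (fun i => PySem.List.pyGetD l (i + 1) 0 - PySem.List.pyGetD l i 0) with hdl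
    have hdl2 : dl = (List.range (S.length - 1)).map
        (fun j => l.getD (j + 1) 0 - l.getD j 0) := by
      rw [hdl, PySem.List.pyRange_one, List.map_map]
      rw [show (((S.length : Int) - 1) - 0).toNat = S.length - 1 from by omega]
      refine List.map_congr_left ?_
      intro j hj
      simp only [Function.comp_apply]
      rw [show (0 : Int) + (j : Int) = (j : Int) from by ring]
      rw [show (j : Int) + 1 = ((j + 1 : Nat) : Int) from by push_cast; ring]
      rw [PySem.List.pyGetD_natCast, PySem.List.pyGetD_natCast]
    have hcond : ((PySem.Set.len (PySem.Set.ofList dl) == 1) &&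
        ((PySem.Set.ofList dl).headD 0 == 1)) = true ↔ l = window (l.headD 0) S.length := by
      rw [Bool.and_eq_true, beq_iff_eq, beq_iff_eq]
      have hsl : PySem.Set.len (PySem.Set.ofList dl) = ((PySem.Set.ofList dl).length : Int) := rfl
      rw [hsl]
      constructor
      · rintro ⟨hlen1, hhead⟩
        have h1 : (PySem.Set.ofList dl).length = 1 := by exact_mod_cast hlen1
        have hsingle : PySem.Set.ofList dl = [1] := (len1_head _).mp ⟨h1, hhead⟩
        obtain ⟨hne', hall⟩ := (ofList_eq_singleton dl 1).mp hsingle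
        have hcc : ∀ j, j + 1 < l.length → l.getD (j + 1) 0 = l.getD j 0 + 1 := by
          intro j hj
          have hjmem : l.getD (j + 1) 0 - l.getD j 0 ∈ dl := by
            rw [hdl2]
            exact List.mem_map.mpr ⟨j, List.mem_range.mpr (by omega), rfl⟩
          have := hall _ hjmem
          omega
        have hwin := (consec_char l hne).mp hcc
        rw [← hlen]
        exact hwin
      · intro hwin
        have hcc := (consec_char l hne).mpr (by rw [hlen]; exact hwin)
        have hall : ∀ x ∈ dl, x = 1 := by
          intro x hx
          rw [hdl2] at hx
          obtain ⟨j, hj, hx'⟩ := List.mem_map.mp hx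
          rw [← hx']
          have hjb : j < S.length - 1 := List.mem_range.mp hj
          have := hcc j (by omega)
          omega
        have hne' : dl ≠ [] := by
          rw [hdl2]
          intro hnil
          rw [List.map_eq_nil_iff, List.range_eq_nil] at hnil
          omega
        have hsingle := (ofList_eq_singleton dl 1).mpr ⟨hne', hall⟩
        rw [hsingle]
        exact ⟨rfl, rfl⟩
    by_cases hwin : l = window (l.headD 0) S.length
    · rw [if_pos (hcond.mpr hwin), if_pos ⟨h3', hwin⟩]
      rw [PySem.List.len_eq]
      ring
    · rw [if_neg (fun h => hwin (hcond.mp h)), if_neg (fun hc => hwin hc.2)]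

theorem sorted_window_iff (X : List Int) (v : Int) (k : Nat) :
    PySem.List.sorted X (fun x => x) false = window v k ↔ X.Perm (window v k) := by
  constructor
  · intro h
    have hp := PySem.List.sorted_perm X (fun x => x) false
    rw [h] at hp
    exact hp.symm
  · intro h
    exact PySem.List.sorted_eq_of_perm_of_pairwise_lt X (window v k) (fun x => x) h.symm
      (window_pairwise v k)

theorem dlist_sorted (cards : List (Int × String)) : (dlistOf cards).Pairwise (· < ·) := by
  unfold dlistOf
  exact PySem.List.sorted_ofList_pairwise_lt _

theorem dlist_mem (cards : List (Int × String)) (x : Int) :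
    x ∈ dlistOf cards ↔ x ∈ cards.map Prod.fst := by
  unfold dlistOf ranksOf
  rw [PySem.List.mem_sorted, PySem.Set.mem_ofList]

theorem dlist_nodup (cards : List (Int × String)) : (dlistOf cards).Nodup := by
  unfold dlistOf
  exact (PySem.List.sorted_perm _ _ _).symm.nodup (PySem.Set.nodup_ofList _)

-- a subset either scores 0 or scores its size, which is at most the longest streak
theorem score_le_MX (cards S : List (Int × String)) (hsub : S.Sublist cards)
    (h3 : 3 ≤ S.length) :
    score_sequence S = 0 ∨
      (score_sequence S = (S.length : Int) ∧ (S.length : Int) ≤ MX (dlistOf cards)) := by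
  rw [score_char]
  by_cases hcnd : 3 ≤ S.length ∧
      PySem.List.sorted (S.map Prod.fst) (fun x => x) false
        = window ((PySem.List.sorted (S.map Prod.fst) (fun x => x) false).headD 0) S.length
  · right
    rw [if_pos hcnd]
    refine ⟨rfl, ?_⟩
    obtain ⟨_, hwin⟩ := hcnd
    have hperm := (sorted_window_iff (S.map Prod.fst) _ S.length).mp hwin
    have hall : ∀ j ∈ window ((PySem.List.sorted (S.map Prod.fst) (fun x => x) false).headD 0)
        S.length, j ∈ dlistOf cards := by
      intro j hj
      have hjS : j ∈ S.map Prod.fst := hperm.mem_iff.mpr hj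
      have hjR : j ∈ cards.map Prod.fst := (hsub.map Prod.fst).subset hjS
      exact (dlist_mem cards j).mpr hjR
    exact runlen_le_MX _ _ S.length (dlist_sorted cards) (by omega) hall
  · left
    rw [if_neg hcnd]

-- counting the subsets of size k = MX that score k
theorem countP_score_eq (cards : List (Int × String)) (k : Nat)
    (hk : (k : Int) = MX (dlistOf cards)) (h3 : 3 ≤ k) :
    (PySem.List.combinations cards k).countP (fun S => score_sequence S == (k : Int))
      = (((streaks (dlistOf cards)).filter (fun s => s.length == k)).map
          (fun s => (s.map (fun w => (cards.map Prod.fst).count w)).prod)).sum := by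
  have hDsorted := dlist_sorted cards
  have hflat := streaks_flatten (dlistOf cards)
  set V := (dlistOf cards).filter (startsP (dlistOf cards) k) with hV
  have hVnodup : V.Nodup := (dlist_nodup cards).filter _
  have hVmem : ∀ v ∈ V, (∀ j ∈ window v k, j ∈ dlistOf cards) := by
    intro v hv j hj
    have h1 := List.of_mem_filter hv
    rw [startsP, List.all_eq_true] at h1
    simpa using h1 j hj
  -- characterize the counted predicate on members
  have hQiff : ∀ S ∈ PySem.List.combinations cards k,
      ((fun S => score_sequence S == (k : Int)) S = true ↔
        ∃ v ∈ V, (fun v S => decide (PySem.List.sorted (S.map Prod.fst) (fun x => x) false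
          = window v k)) v S = true) := by
    intro S hS
    have hlenS : S.length = k := PySem.List.length_of_mem_combinations hS
    have hsubS : S.Sublist cards := PySem.List.sublist_of_mem_combinations hS
    simp only [beq_iff_eq, decide_eq_true_eq]
    rw [score_char]
    constructor
    · intro hsc
      by_cases hcnd : 3 ≤ S.length ∧
          PySem.List.sorted (S.map Prod.fst) (fun x => x) false
            = window ((PySem.List.sorted (S.map Prod.fst) (fun x => x) false).headD 0) S.length
      · obtain ⟨_, hwin⟩ := hcnd
        set v := (PySem.List.sorted (S.map Prod.fst) (fun x => x) false).headD 0 with hv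
        rw [hlenS] at hwin
        refine ⟨v, ?_, hwin⟩
        have hperm := (sorted_window_iff (S.map Prod.fst) v k).mp hwin
        have hmemD : ∀ j ∈ window v k, j ∈ dlistOf cards := by
          intro j hj
          have hjS : j ∈ S.map Prod.fst := hperm.mem_iff.mpr hj
          exact (dlist_mem cards j).mpr ((hsubS.map Prod.fst).subset hjS)
        have hvD : v ∈ dlistOf cards :=
          hmemD v (mem_window.mpr ⟨le_refl _, by omega⟩)
        refine List.mem_filter.mpr ⟨hvD, ?_⟩
        simp only [startsP, List.all_eq_true]
        intro j hj
        simpa using hmemD j hj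
      · rw [if_neg hcnd] at hsc
        exfalso
        omega
    · rintro ⟨v, hvV, hwin⟩
      obtain ⟨k', rfl⟩ : ∃ k', k = k' + 1 := ⟨k - 1, by omega⟩
      have hhead : (PySem.List.sorted (S.map Prod.fst) (fun x => x) false).headD 0 = v := by
        rw [hwin, window_headD]
      rw [if_pos ⟨by omega, by rw [hhead, hlenS]; exact hwin⟩]
      rw [hlenS]
  have hQuniq : ∀ (S : List (Int × String)) v w, v ∈ V → w ∈ V →
      (fun v S => decide (PySem.List.sorted (S.map Prod.fst) (fun x => x) false
        = window v k)) v S = true →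
      (fun v S => decide (PySem.List.sorted (S.map Prod.fst) (fun x => x) false
        = window v k)) w S = true → v = w := by
    intro S v w _ _ h1 h2
    simp only [decide_eq_true_eq] at h1 h2
    obtain ⟨k', rfl⟩ : ∃ k', k = k' + 1 := ⟨k - 1, by omega⟩
    have := h1.symm.trans h2
    have hv := window_headD v k' 0
    have hw := window_headD w k' 0
    rw [← hv, ← hw, this]
  rw [countP_partition V (PySem.List.combinations cards k) _ _ hVnodup hQiff hQuniq]
  -- each term is a product of rank multiplicities
  have hterm : ∀ v : Int,
      (PySem.List.combinations cards k).countP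
        (fun S => decide (PySem.List.sorted (S.map Prod.fst) (fun x => x) false = window v k))
      = ((window v k).map (fun w => (cards.map Prod.fst).count w)).prod := by
    intro v
    have hcongr : (PySem.List.combinations cards k).countP
        (fun S => decide (PySem.List.sorted (S.map Prod.fst) (fun x => x) false = window v k))
      = (PySem.List.combinations cards k).countP
        (fun S => decide ((S.map Prod.fst).Perm (window v k))) := by
      refine List.countP_congr ?_
      intro S _
      simp only [decide_eq_true_eq]
      exact sorted_window_iff (S.map Prod.fst) v k
    rw [hcongr]
    have := countPerm cards (window v k) (window_nodup v k)
    rw [window_length] at this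
    exact this
  have hmapterm : V.map (fun v => (PySem.List.combinations cards k).countP
      (fun S => decide (PySem.List.sorted (S.map Prod.fst) (fun x => x) false = window v k)))
      = V.map (fun v => ((window v k).map (fun w => (cards.map Prod.fst).count w)).prod) :=
    List.map_congr_left (fun v _ => hterm v)
  rw [hmapterm, hV, V_char (dlistOf cards) k hDsorted hk (by omega), List.map_map]
  refine congrArg List.sum (List.map_congr_left ?_)
  intro t ht
  obtain ⟨htS, htk⟩ := List.mem_filter.mp ht
  have htk' : t.length = k := by simpa using htk
  obtain ⟨m, hwin, hlenm⟩ := streaks_mem_window _ t htS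
  have hmk : m + 1 = k := by omega
  simp only [Function.comp_apply]
  congr 1
  rw [← hmk, ← hwin]

-- ---- the main equivalence of the two ports ----
theorem mainAB (cards : List (Int × String)) :
    score_sequences cards = score_sequences_alt cards := by
  rw [altChar]
  unfold score_sequences
  simp only []
  rw [PySem.List.foldl_append_singleton_eq_map, List.nil_append, PySem.List.len_eq]
  set subs := ((PySem.List.pyRange 3 ((cards.length : Int) + 1) 1).map
      (fun i => PySem.List.combinations cards i.toNat)).flatten with hsubs
  set scores := subs.map (fun cs => score_sequence cs) with hscores
  have hsub_mem : ∀ S ∈ subs, S.Sublist cards ∧ 3 ≤ S.length := by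
    intro S hS
    rw [hsubs] at hS
    obtain ⟨piece, hp, hSp⟩ := List.mem_flatten.mp hS
    obtain ⟨i, hi, hpi⟩ := List.mem_map.mp hp
    have hi' := PySem.List.mem_pyRange_one.mp hi
    rw [← hpi] at hSp
    have hsubS := PySem.List.sublist_of_mem_combinations hSp
    have hlenS := PySem.List.length_of_mem_combinations hSp
    exact ⟨hsubS, by omega⟩
  by_cases hMX : 3 ≤ MX (dlistOf cards)
  · obtain ⟨k, hk⟩ : ∃ k : Nat, (k : Int) = MX (dlistOf cards) :=
      ⟨(MX (dlistOf cards)).toNat, Int.toNat_of_nonneg (MX_nonneg (dlistOf cards))⟩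
    have hk3 : 3 ≤ k := by omega
    obtain ⟨sstar, hsstar, hslen⟩ := MX_attained (dlistOf cards) (by omega)
    have hallD : ∀ w ∈ sstar, w ∈ cards.map Prod.fst := by
      intro w hw
      refine (dlist_mem cards w).mp ?_
      rw [← streaks_flatten (dlistOf cards)]
      exact List.mem_flatten.mpr ⟨sstar, hsstar, hw⟩
    obtain ⟨m, hwin, hlenm⟩ := streaks_mem_window _ sstar hsstar
    have hndS : sstar.Nodup := by rw [hwin]; exact window_nodup _ _
    have hpermW := pick_perm cards sstar hndS hallD
    have hsubW : (pick cards sstar).Sublist cards := pick_sublist cards sstar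
    have hlenW : (pick cards sstar).length = k := by
      have h1 := hpermW.length_eq
      rw [List.length_map] at h1
      omega
    have hmk : m + 1 = k := by omega
    have hscoreW : score_sequence (pick cards sstar) = (k : Int) := by
      rw [score_char]
      have hwinS : PySem.List.sorted ((pick cards sstar).map Prod.fst) (fun x => x) false
          = window (sstar.headD 0) (m + 1) := by
        refine (sorted_window_iff _ _ _).mpr ?_
        rw [← hwin]
        exact hpermW
      have hcnd : 3 ≤ (pick cards sstar).length ∧
          PySem.List.sorted ((pick cards sstar).map Prod.fst) (fun x => x) false
            = window ((PySem.List.sorted ((pick cards sstar).map Prod.fst) (fun x => x)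
                false).headD 0) (pick cards sstar).length := by
        refine ⟨by omega, ?_⟩
        rw [hwinS, window_headD, hlenW, ← hmk]
      rw [if_pos hcnd, hlenW]
    have hmemW : pick cards sstar ∈ subs := by
      rw [hsubs]
      refine List.mem_flatten.mpr ⟨PySem.List.combinations cards k, ?_, ?_⟩
      · refine List.mem_map.mpr ⟨(k : Int), ?_, ?_⟩
        · refine PySem.List.mem_pyRange_one.mpr ⟨by omega, ?_⟩
          have := hsubW.length_le
          omega
        · rw [Int.toNat_natCast]
      · exact (PySem.List.mem_combinations_iff cards k _).mpr ⟨hsubW, hlenW⟩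
    have hscoresW : (k : Int) ∈ scores := by
      rw [hscores]
      exact List.mem_map.mpr ⟨_, hmemW, hscoreW⟩
    have hbound : ∀ x ∈ scores, x ≤ (k : Int) := by
      intro x hx
      rw [hscores] at hx
      obtain ⟨S, hS, hxS⟩ := List.mem_map.mp hx
      obtain ⟨hsubS, h3S⟩ := hsub_mem S hS
      rcases score_le_MX cards S hsubS h3S with h0 | ⟨hv, hle⟩
      · rw [← hxS, h0]; omega
      · rw [← hxS, hv]; omega
    have hmax : (PySem.List.max? scores (fun x => x)).getD 0 = (k : Int) := by
      cases hm : PySem.List.max? scores (fun x => x) with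
      | none =>
        rw [PySem.List.max?_eq_none_iff] at hm
        rw [hm] at hscoresW
        cases hscoresW
      | some m0 =>
        have h1 := PySem.List.max?_mem hm
        have h2 := PySem.List.max?_isMax hm _ hscoresW
        have h3 := hbound m0 h1
        simp only [Option.getD_some]
        simp only [] at h2
        omega
    rw [hmax]
    rw [PySem.List.sum_map_ite_one_zero]
    have hcount : scores.countP (fun i => i == (k : Int)) =
        (((streaks (dlistOf cards)).filter (fun s => s.length == k)).map
          (fun s => (s.map (fun w => (cards.map Prod.fst).count w)).prod)).sum := by
      rw [hscores, List.countP_map, hsubs, List.countP_flatten, List.map_map]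
      have hz : ∀ i ∈ PySem.List.pyRange 3 ((cards.length : Int) + 1) 1, i ≠ (k : Int) →
          ((List.countP ((fun i => i == (k : Int)) ∘ (fun cs => score_sequence cs))) ∘
            (fun i => PySem.List.combinations cards i.toNat)) i = 0 := by
        intro i hi hne
        have hi' := PySem.List.mem_pyRange_one.mp hi
        simp only [Function.comp_apply]
        refine List.countP_eq_zero.mpr ?_
        intro S hS
        have hlenS := PySem.List.length_of_mem_combinations hS
        have hsubS := PySem.List.sublist_of_mem_combinations hS
        have hilen : (S.length : Int) = i := by rw [hlenS]; omega
        simp only [Function.comp_apply, beq_iff_eq]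
        intro hsc
        rcases score_le_MX cards S hsubS (by omega) with h0 | ⟨hv, _⟩
        · rw [h0] at hsc; omega
        · rw [hv] at hsc; omega
      have hkmem : (k : Int) ∈ PySem.List.pyRange 3 ((cards.length : Int) + 1) 1 := by
        refine PySem.List.mem_pyRange_one.mpr ⟨by omega, ?_⟩
        have := hsubW.length_le
        omega
      rw [sum_single _ _ ((k : Int)) (PySem.List.nodup_pyRange_one _ _) hkmem hz]
      simp only [Function.comp_apply, Int.toNat_natCast]
      exact countP_score_eq cards k hk hk3
    rw [hcount, if_pos hMX, ← hk]
    congr 1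
    rw [Nat.cast_list_sum, List.map_map]
    unfold SX freqOf ranksOf
    have hfilter : (streaks (dlistOf cards)).filter (fun s => ((s.length : Int) == (k : Int)))
        = (streaks (dlistOf cards)).filter (fun s => s.length == k) := by
      refine List.filter_congr ?_
      intro s _
      by_cases h : s.length = k
      · simp [h]
      · have h2 : ((s.length : Int)) ≠ (k : Int) := by exact_mod_cast h
        simp [h, h2]
    rw [hfilter]
    refine congrArg List.sum (List.map_congr_left ?_)
    intro s _
    simp only [Function.comp_apply]
    rw [Nat.cast_list_prod, List.map_map]
    rfl
  · have hall0 : ∀ x ∈ scores, x = 0 := by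
      intro x hx
      rw [hscores] at hx
      obtain ⟨S, hS, hxS⟩ := List.mem_map.mp hx
      obtain ⟨hsubS, h3S⟩ := hsub_mem S hS
      rcases score_le_MX cards S hsubS h3S with h0 | ⟨hv, hle⟩
      · rw [← hxS, h0]
      · exfalso
        rw [hv] at hxS
        omega
    have hmax0 : (PySem.List.max? scores (fun x => x)).getD 0 = 0 := by
      cases hm : PySem.List.max? scores (fun x => x) with
      | none => rfl
      | some m0 =>
        have h1 := PySem.List.max?_mem hm
        simp only [Option.getD_some]
        exact hall0 m0 h1
    rw [hmax0, if_neg hMX]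
    simp

-- ===== VERDICT (by name: the statement is the Claim_ definition above) =====
theorem score_sequences_spec : Claim_equal_score_sequences := by
  intro cards _ _
  exact mainAB cards

def score_sequences_raises : Claim_raises_score_sequences := by
  unfold Claim_raises_score_sequences
  refine ⟨fun cards _ h => by unfold Raises_score_sequences at h; unfold Pre_score_sequences; omega, by decide⟩
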